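-- pv_equiv track=rewrite | github.com/konstantyg/aoc | 2025/03/solution.py | part1
-- ===== SOURCE A (Python) =====
-- from itertools import combinations
--
-- def part1(data: list[tuple[int, int]]) -> int:
--     s: int = 0
--     for l in data:
--         m = 0
--         for x, y in combinations(l, 2):
--             m = max(m, (10 * x) + y)
--         s += m
--     return s
-- ===== SOURCE B (Python) =====
-- def part1(data: list[tuple[int, int]]) -> int:
--     s = 0
--     for l in data:
--         m = 0
--         if l:
--             best = l[0]
--             for v in l[1:]:
--                 m = max(m, 10 * best + v)
--                 best = max(best, v)
--         s += m
--     return s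
-- ===== Notes on version B (the rewrite author's own statement) =====
-- stated objective: faster
-- what changed: Replaces the quadratic scan over all combinations(l,2) by a single pass per list tracking the running maximum of the first element, since max over pairs (x,y) with x before y equals 10*prefix-max + y.
import Mathlib
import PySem

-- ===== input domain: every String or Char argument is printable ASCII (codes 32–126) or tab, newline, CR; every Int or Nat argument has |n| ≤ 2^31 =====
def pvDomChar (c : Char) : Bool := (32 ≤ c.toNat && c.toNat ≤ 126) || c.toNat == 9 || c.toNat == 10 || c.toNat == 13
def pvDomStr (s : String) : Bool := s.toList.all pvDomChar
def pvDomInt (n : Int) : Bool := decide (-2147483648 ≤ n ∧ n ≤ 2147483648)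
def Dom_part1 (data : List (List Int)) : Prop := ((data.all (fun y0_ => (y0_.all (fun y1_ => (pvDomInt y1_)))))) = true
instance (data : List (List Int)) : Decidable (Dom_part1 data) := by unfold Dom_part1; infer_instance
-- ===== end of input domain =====

-- B replaces A's quadratic scan over all ordered pairs by one linear pass per list
-- tracking the prefix maximum of the first pair element (objective: faster).

-- ===== PORT A =====
-- itertools.combinations(l, 2): all pairs (x, y) with x strictly before y in l
def pvCombos2 : List Int → List (Int × Int)
  | [] => []
  | x :: rest => rest.map (fun y => (x, y)) ++ pvCombos2 rest

def part1 (data : List (List Int)) : Int :=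
  data.foldl (fun s l =>
    s + (pvCombos2 l).foldl (fun m p => max m (10 * p.1 + p.2)) 0) 0

-- ===== PORT B =====
-- the 'for v in l[1:]' loop of Source B, state (m, best)
def pvLoopB : List Int → Int → Int → Int
  | [], m, _ => m
  | v :: rest, m, best => pvLoopB rest (max m (10 * best + v)) (max best v)

def part1_alt (data : List (List Int)) : Int :=
  data.foldl (fun s l =>
    s + (match l with
         | [] => 0
         | x :: rest => pvLoopB rest 0 x)) 0

-- ===== PRECONDITION & SPEC =====
def Spec_part1 (data : List (List Int)) (out : Int) : Prop := out = part1_alt data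
instance (data : List (List Int)) (out : Int) : Decidable (Spec_part1 data out) := by unfold Spec_part1; infer_instance

-- ===== CLAIM (what is proved, stated in full; the proofs are below) =====
def Claim_equal_part1 : Prop := ∀ (data : List (List Int)), Dom_part1 data → Spec_part1 data (part1 data)

-- ===== LEMMAS AND PROOFS =====

-- A's inner fold, abbreviated
def pvM (xs : List (Int × Int)) (m : Int) : Int :=
  xs.foldl (fun m p => max m (10 * p.1 + p.2)) m

theorem pvM_append (xs ys : List (Int × Int)) (m : Int) :
    pvM (xs ++ ys) m = pvM ys (pvM xs m) := by
  simp [pvM]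

-- L1: an extra max in the seed can be pulled out of the fold
theorem pvM_max (xs : List (Int × Int)) (m a : Int) :
    pvM xs (max m a) = max (pvM xs m) a := by
  induction xs generalizing m with
  | nil => rfl
  | cons p xs ih =>
      simp only [pvM, List.foldl_cons] at *
      have h : max (max m a) (10 * p.1 + p.2) = max (max m (10 * p.1 + p.2)) a := by omega
      rw [h, ih]

-- L2: folding pairs with first component b then with x equals folding with max b x
theorem pvM_map_max (ys : List Int) (b x m : Int) :
    pvM (ys.map (fun y => (max b x, y))) m
      = pvM (ys.map (fun y => (x, y))) (pvM (ys.map (fun y => (b, y))) m) := by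
  induction ys generalizing m with
  | nil => rfl
  | cons y ys ih =>
      simp only [List.map_cons, pvM, List.foldl_cons]
      show pvM (ys.map (fun y => (max b x, y))) (max m (10 * max b x + y))
        = pvM (ys.map (fun y => (x, y))) (max (pvM (ys.map (fun y => (b, y))) (max m (10 * b + y))) (10 * x + y))
      rw [pvM_max (ys.map (fun y => (b, y))) m (10 * b + y)]
      have h : max (max (pvM (ys.map (fun y => (b, y))) m) (10 * b + y)) (10 * x + y)
          = max (pvM (ys.map (fun y => (b, y))) m) (10 * max b x + y) := by omega
      rw [h, pvM_max, ih, ← pvM_max]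

-- main per-list lemma: B's loop computes A's fold over combinations with seed element b
theorem pvLoopB_eq (l : List Int) (b m : Int) :
    pvLoopB l m b = pvM (pvCombos2 (b :: l)) m := by
  induction l generalizing b m with
  | nil => rfl
  | cons v rest ih =>
      show pvLoopB rest (max m (10 * b + v)) (max b v)
        = pvM (pvCombos2 (b :: v :: rest)) m
      rw [ih]
      show pvM (pvCombos2 (max b v :: rest)) (max m (10 * b + v)) = _
      simp only [pvCombos2, List.map_cons, List.cons_append]
      show pvM (rest.map (fun y => (max b v, y)) ++ pvCombos2 rest) (max m (10 * b + v))
        = pvM ((b, v) :: (rest.map (fun y => (b, y)) ++ (rest.map (fun y => (v, y)) ++ pvCombos2 rest))) m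
      rw [pvM_append]
      have : pvM ((b, v) :: (rest.map (fun y => (b, y)) ++ (rest.map (fun y => (v, y)) ++ pvCombos2 rest))) m
          = pvM (pvCombos2 rest) (pvM (rest.map (fun y => (v, y))) (pvM (rest.map (fun y => (b, y))) (max m (10 * b + v)))) := by
        simp only [pvM, List.foldl_cons, List.foldl_append]
      rw [this, ← pvM_map_max]

theorem pvInner_eq (l : List Int) :
    (match l with | [] => (0 : Int) | x :: rest => pvLoopB rest 0 x)
      = pvM (pvCombos2 l) 0 := by
  cases l with
  | nil => rfl
  | cons x rest => exact pvLoopB_eq rest x 0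

theorem pvFold_eq (ds : List (List Int)) (s : Int) :
    ds.foldl (fun s l => s + (pvCombos2 l).foldl (fun m p => max m (10 * p.1 + p.2)) 0) s
      = ds.foldl (fun s l => s + (match l with | [] => 0 | x :: rest => pvLoopB rest 0 x)) s := by
  induction ds generalizing s with
  | nil => rfl
  | cons d ds ihd =>
      simp only [List.foldl_cons]
      rw [pvInner_eq d, ihd]
      simp only [pvM]

-- ===== VERDICT (by name: the statement is the Claim_ definition above) =====
theorem part1_spec : Claim_equal_part1 := by
  intro data _
  show part1 data = part1_alt data
  unfold part1 part1_alt
  exact pvFold_eq data 0
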